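-- pv_equiv track=rewrite | github.com/HormyAJP/fuzzy_search | fuzzy_search.py | fuzzy_match_with_highlights
-- ===== SOURCE A (Python) =====
-- NO_HIGHLIGHT = 0
--
-- HIGHLIGHT = 1
--
-- def fuzzy_match_with_highlights(search_string, string_to_search, case_sensitive=False):
--     if len(search_string) == 0:
--         return [(NO_HIGHLIGHT, string_to_search)]
--     if len(string_to_search) == 0:
--         return []
--
--
--     def matches(left, right, case_sensitive):
--         if case_sensitive:
--             return left == right
--         else:
--             return left.lower() == right.lower()
--
--     def close_group_if_needed(ret, current_highlight, expected_highlight, current_group):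
--         if current_highlight != expected_highlight:
--             ret.append((current_highlight, ''.join(current_group)))
--             return [], expected_highlight
--         return current_group, expected_highlight
--
--     ret = []
--     current_highlight = None
--     current_group = []
--     search_index = 0
--
--     # Minor optimization to prevent checking len(current_group) != 0 each loop
--     search_char = search_string[search_index]
--     searchee_char = string_to_search[0]
--     current_group.append(searchee_char)
--     if matches(search_char, searchee_char, case_sensitive):
--         current_highlight = HIGHLIGHT
--         search_index = 1
--     else:
--         current_highlight = NO_HIGHLIGHT
--
--     searchee_index = 1
--     while searchee_index < len(string_to_search) and search_index < len(search_string):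
--         if search_index == len(search_string):
--             # We've matched every search character so we can stop
--             break
--
--         search_char = search_string[search_index]
--         searchee_char = string_to_search[searchee_index]
--
--         if matches(search_char, searchee_char, case_sensitive):
--             search_index += 1
--             searchee_index += 1
--             current_group, current_highlight = close_group_if_needed(ret, current_highlight, HIGHLIGHT, current_group)
--             current_group.append(searchee_char)
--             continue
--
--         current_group, current_highlight = close_group_if_needed(ret, current_highlight, NO_HIGHLIGHT, current_group)
--         current_group.append(searchee_char)
--         searchee_index += 1
--
--     if searchee_index != len(string_to_search):
--         current_group, current_highlight = close_group_if_needed(ret, current_highlight, NO_HIGHLIGHT, current_group)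
--         current_group += string_to_search[searchee_index:]
--
--     if len(current_group) != 0:
--         ret.append((current_highlight, ''.join(current_group)))
--
--     if search_index != len(search_string):
--         # Some of the search characters were unmatched. We consider this a failed match.
--         return []
--     return ret
-- ===== SOURCE B (Python) =====
-- NO_HIGHLIGHT = 0
--
-- HIGHLIGHT = 1
--
--
-- def fuzzy_match_with_highlights(search_string, string_to_search, case_sensitive=False):
--     if len(search_string) == 0:
--         return [(NO_HIGHLIGHT, string_to_search)]
--     if len(string_to_search) == 0:
--         return []
--
--     def norm(c):
--         return c if case_sensitive else c.lower()
--
--     # Pass 1: flag every character of string_to_search in one greedy sweep.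
--     flags = []
--     search_index = 0
--     for ch in string_to_search:
--         if search_index < len(search_string) and norm(search_string[search_index]) == norm(ch):
--             flags.append((HIGHLIGHT, ch))
--             search_index += 1
--         else:
--             flags.append((NO_HIGHLIGHT, ch))
--
--     if search_index != len(search_string):
--         return []
--
--     # Pass 2: group consecutive equal flags into runs.
--     runs = []
--     for flag, ch in flags:
--         if runs and runs[-1][0] == flag:
--             runs[-1] = (flag, runs[-1][1] + ch)
--         else:
--             runs.append((flag, ch))
--     return runs
-- ===== Notes on version B (the rewrite author's own statement) =====
-- stated objective: simpler
-- what changed: Replaces A's single stateful loop (special-cased first character, in-loop group closing, tail splice and leftover-group flush) by two plain passes: a greedy flagging sweep over string_to_search, then a separate grouping of consecutive equal flags into runs.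
import Mathlib
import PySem

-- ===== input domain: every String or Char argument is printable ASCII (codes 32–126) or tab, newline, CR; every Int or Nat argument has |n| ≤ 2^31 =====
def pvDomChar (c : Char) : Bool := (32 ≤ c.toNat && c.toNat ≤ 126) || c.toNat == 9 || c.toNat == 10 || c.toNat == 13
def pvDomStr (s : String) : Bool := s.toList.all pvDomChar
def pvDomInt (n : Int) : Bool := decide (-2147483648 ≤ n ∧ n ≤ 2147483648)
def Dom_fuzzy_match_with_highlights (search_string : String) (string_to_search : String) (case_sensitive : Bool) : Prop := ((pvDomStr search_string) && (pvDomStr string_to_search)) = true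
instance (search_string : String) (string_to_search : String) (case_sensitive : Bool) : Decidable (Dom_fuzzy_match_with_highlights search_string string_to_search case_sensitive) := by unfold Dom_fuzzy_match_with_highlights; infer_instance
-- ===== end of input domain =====

-- B restructures A's single stateful loop into two plain passes (greedy flagging, then run grouping); same results, objective: simpler.

-- ===== PORT A =====
-- matches(left, right, case_sensitive)
def pvMatch (left right : Char) (cs : Bool) : Bool :=
  if cs then left == right
  else PySem.Chars.lowerChar left == PySem.Chars.lowerChar right

-- close_group_if_needed: returns (ret', current_group', current_highlight')
def pvClose (ret : List (Int × String)) (ch expected : Int) (grp : List Char) :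
    List (Int × String) × List Char × Int :=
  if ch ≠ expected then (ret ++ [(ch, String.ofList grp)], [], expected)
  else (ret, grp, ch)

-- A's while loop; returns (ret, current_highlight, current_group, remaining searchee chars, search_index)
def pvAwhile (search : List Char) (cs : Bool) :
    List Char → Nat → List (Int × String) → Int → List Char →
    List (Int × String) × Int × List Char × List Char × Nat
  | [], si, ret, ch, grp => (ret, ch, grp, [], si)
  | c :: rest, si, ret, ch, grp =>
    if h : si < search.length then
      if pvMatch search[si] c cs then
        let (ret', grp', ch') := pvClose ret ch 1 grp
        pvAwhile search cs rest (si + 1) ret' ch' (grp' ++ [c])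
      else
        let (ret', grp', ch') := pvClose ret ch 0 grp
        pvAwhile search cs rest si ret' ch' (grp' ++ [c])
    else (ret, ch, grp, c :: rest, si)

-- A's code after the while loop (the two trailing ifs building ret)
def pvApost (ret : List (Int × String)) (ch : Int) (grp rest' : List Char) : List (Int × String) :=
  let s :=
    if rest' ≠ [] then
      let (r, g, c) := pvClose ret ch 0 grp
      (r, c, g ++ rest')
    else (ret, ch, grp)
  if s.2.2 ≠ [] then s.1 ++ [(s.2.1, String.ofList s.2.2)] else s.1

def fuzzy_match_with_highlights (search_string : String) (string_to_search : String) (case_sensitive : Bool) : List (Int × String) :=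
  match search_string.toList, string_to_search.toList with
  | [], _ => [((0 : Int), string_to_search)]
  | _ :: _, [] => []
  | s0 :: stail, c0 :: rest0 =>
    let search := s0 :: stail
    -- first searchee char handled before the loop, as in A
    let (ch0, si0) : Int × Nat := if pvMatch s0 c0 case_sensitive then (1, 1) else (0, 0)
    let r := pvAwhile search case_sensitive rest0 si0 [] ch0 [c0]
    if r.2.2.2.2 ≠ search.length then [] else pvApost r.1 r.2.1 r.2.2.1 r.2.2.2.1

-- ===== PORT B =====
-- pass 1: flag each char (greedy), also returning the final search_index
def pvScan (search : List Char) (cs : Bool) :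
    List Char → Nat → List (Int × Char) × Nat
  | [], si => ([], si)
  | c :: rest, si =>
    if h : si < search.length then
      if pvMatch search[si] c cs then
        let (fl, si') := pvScan search cs rest (si + 1)
        (((1 : Int), c) :: fl, si')
      else
        let (fl, si') := pvScan search cs rest si
        (((0 : Int), c) :: fl, si')
    else
      let (fl, si') := pvScan search cs rest si
      (((0 : Int), c) :: fl, si')

-- pass 2: one grouping step (runs[-1] extended or a new run appended)
def pvRunsStep (runs : List (Int × String)) (fc : Int × Char) : List (Int × String) :=
  match runs.getLast? with
  | some (f, s) =>
    if f = fc.1 then runs.dropLast ++ [(f, s.push fc.2)]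
    else runs ++ [(fc.1, String.singleton fc.2)]
  | none => runs ++ [(fc.1, String.singleton fc.2)]

def fuzzy_match_with_highlights_alt (search_string : String) (string_to_search : String) (case_sensitive : Bool) : List (Int × String) :=
  match search_string.toList, string_to_search.toList with
  | [], _ => [((0 : Int), string_to_search)]
  | _ :: _, [] => []
  | s0 :: stail, c0 :: rest0 =>
    let p := pvScan (s0 :: stail) case_sensitive (c0 :: rest0) 0
    if p.2 ≠ (s0 :: stail).length then []
    else p.1.foldl pvRunsStep []

-- ===== PRECONDITION & SPEC =====
def Spec_fuzzy_match_with_highlights (search_string : String) (string_to_search : String) (case_sensitive : Bool) (out : List (Int × String)) : Prop := out = fuzzy_match_with_highlights_alt search_string string_to_search case_sensitive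
instance (search_string : String) (string_to_search : String) (case_sensitive : Bool) (out : List (Int × String)) : Decidable (Spec_fuzzy_match_with_highlights search_string string_to_search case_sensitive out) := by unfold Spec_fuzzy_match_with_highlights; infer_instance

-- ===== CLAIM (what is proved, stated in full; the proofs are below) =====
def Claim_equal_fuzzy_match_with_highlights : Prop := ∀ (search_string : String) (string_to_search : String) (case_sensitive : Bool), Dom_fuzzy_match_with_highlights search_string string_to_search case_sensitive → Spec_fuzzy_match_with_highlights search_string string_to_search case_sensitive (fuzzy_match_with_highlights search_string string_to_search case_sensitive)

-- ===== LEMMAS AND PROOFS =====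

theorem pvPushOfList (g : List Char) (c : Char) : (String.ofList g).push c = String.ofList (g ++ [c]) := by
  have h : ((String.ofList g).push c).toList = g ++ [c] := by simp
  rw [← h, String.ofList_toList]

theorem pvSingletonOfList (c : Char) : String.singleton c = String.ofList [c] := by
  have h : (String.singleton c).toList = [c] := by simp
  rw [← h, String.ofList_toList]

-- grouping "continuation": an open run (ch, grp) followed by the remaining flags
def pvGroupFrom (ch : Int) (grp : List Char) : List (Int × Char) → List (Int × String)
  | [] => [(ch, String.ofList grp)]
  | (f, c) :: fl => if f = ch then pvGroupFrom ch (grp ++ [c]) fl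
                    else (ch, String.ofList grp) :: pvGroupFrom f [c] fl

theorem pvRuns_eq_groupFrom (fl : List (Int × Char)) :
    ∀ (out : List (Int × String)) (f : Int) (g : List Char),
    List.foldl pvRunsStep (out ++ [(f, String.ofList g)]) fl = out ++ pvGroupFrom f g fl := by
  induction fl with
  | nil => intro out f g; simp [pvGroupFrom]
  | cons fc fl ih =>
    intro out f g
    obtain ⟨f', c⟩ := fc
    simp only [List.foldl_cons, pvRunsStep, List.getLast?_concat, List.dropLast_concat, pvGroupFrom]
    by_cases h : f' = f
    · subst h
      rw [if_pos rfl, if_pos rfl, pvPushOfList, ih]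
    · rw [if_neg (fun e => h e.symm), if_neg h, pvSingletonOfList, List.append_assoc]
      simpa [List.append_assoc] using ih (out ++ [(f, String.ofList g)]) f' [c]

theorem pvScan_stop (search : List Char) (cs : Bool) (rest : List Char) :
    pvScan search cs rest search.length = (rest.map (fun c => ((0 : Int), c)), search.length) := by
  induction rest with
  | nil => simp [pvScan]
  | cons c rest ih => simp [pvScan, ih]

theorem pvGroupFrom_zeros (l : List Char) :
    ∀ g, pvGroupFrom 0 g (l.map (fun c => ((0 : Int), c))) = [((0 : Int), String.ofList (g ++ l))] := by
  induction l with
  | nil => intro g; simp [pvGroupFrom]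
  | cons c l ih =>
    intro g
    simp only [List.map_cons, pvGroupFrom]
    rw [ih (g ++ [c])]
    simp

-- main loop invariant: A's post-processed result is ret ++ the grouping of B's flags,
-- and both sides reach the same final search_index
theorem pvAwhile_eq (search : List Char) (cs : Bool) :
    ∀ (rest : List Char) (si : Nat) (ret : List (Int × String)) (ch : Int) (grp : List Char),
    grp ≠ [] → si ≤ search.length →
    (pvApost (pvAwhile search cs rest si ret ch grp).1
             (pvAwhile search cs rest si ret ch grp).2.1
             (pvAwhile search cs rest si ret ch grp).2.2.1
             (pvAwhile search cs rest si ret ch grp).2.2.2.1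
      = ret ++ pvGroupFrom ch grp (pvScan search cs rest si).1)
    ∧ (pvAwhile search cs rest si ret ch grp).2.2.2.2 = (pvScan search cs rest si).2 := by
  intro rest
  induction rest with
  | nil =>
    intro si ret ch grp hg _
    simp [pvAwhile, pvScan, pvApost, pvGroupFrom, hg]
  | cons c rest ih =>
    intro si ret ch grp hg hsi
    by_cases h : si < search.length
    · rw [show pvAwhile search cs (c :: rest) si ret ch grp =
            (if pvMatch search[si] c cs then
              let (ret', grp', ch') := pvClose ret ch 1 grp
              pvAwhile search cs rest (si + 1) ret' ch' (grp' ++ [c])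
            else
              let (ret', grp', ch') := pvClose ret ch 0 grp
              pvAwhile search cs rest si ret' ch' (grp' ++ [c]))
          from by simp [pvAwhile, h]]
      rw [show pvScan search cs (c :: rest) si =
            (if pvMatch search[si] c cs then
              (((1 : Int), c) :: (pvScan search cs rest (si + 1)).1, (pvScan search cs rest (si + 1)).2)
            else
              (((0 : Int), c) :: (pvScan search cs rest si).1, (pvScan search cs rest si).2))
          from by simp [pvScan, h]]
      by_cases hm : pvMatch search[si] c cs
      · rw [if_pos hm, if_pos hm]
        by_cases hch : ch = 1
        · subst hch
          have hc : pvClose ret 1 1 grp = (ret, grp, 1) := by simp [pvClose]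
          rw [hc]
          have := ih (si + 1) ret 1 (grp ++ [c]) (by simp) (by omega)
          simpa [pvGroupFrom] using this
        · have hc : pvClose ret ch 1 grp = (ret ++ [(ch, String.ofList grp)], [], 1) := by
            simp [pvClose, hch]
          rw [hc]
          have := ih (si + 1) (ret ++ [(ch, String.ofList grp)]) 1 ([] ++ [c]) (by simp) (by omega)
          constructor
          · rw [this.1]
            simp [pvGroupFrom, Ne.symm hch]
          · exact this.2
      · rw [if_neg hm, if_neg hm]
        by_cases hch : ch = 0
        · subst hch
          have hc : pvClose ret 0 0 grp = (ret, grp, 0) := by simp [pvClose]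
          rw [hc]
          have := ih si ret 0 (grp ++ [c]) (by simp) hsi
          simpa [pvGroupFrom] using this
        · have hc : pvClose ret ch 0 grp = (ret ++ [(ch, String.ofList grp)], [], 0) := by
            simp [pvClose, hch]
          rw [hc]
          have := ih si (ret ++ [(ch, String.ofList grp)]) 0 ([] ++ [c]) (by simp) hsi
          constructor
          · rw [this.1]
            simp [pvGroupFrom, Ne.symm hch]
          · exact this.2
    · -- loop exits: si = search.length; remaining chars all flag 0
      have hsl : si = search.length := by omega
      subst hsl
      rw [show pvAwhile search cs (c :: rest) search.length ret ch grp =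
            (ret, ch, grp, c :: rest, search.length) from by simp [pvAwhile]]
      rw [show pvScan search cs (c :: rest) search.length =
            (((0 : Int), c) :: (rest.map (fun c => ((0 : Int), c))), search.length) from by
          simp [pvScan, pvScan_stop]]
      refine ⟨?_, rfl⟩
      by_cases hch : ch = 0
      · subst hch
        simp only [pvApost, pvClose, if_neg (by simp : ¬ ((0:Int) ≠ 0)), pvGroupFrom]
        rw [pvGroupFrom_zeros rest (grp ++ [c])]
        simp
      · simp only [pvApost, pvClose, if_pos hch, pvGroupFrom, if_neg (Ne.symm hch)]
        rw [pvGroupFrom_zeros rest [c]]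
        simp

-- ===== VERDICT (by name: the statement is the Claim_ definition above) =====
theorem fuzzy_match_with_highlights_spec : Claim_equal_fuzzy_match_with_highlights := by
  intro ss sts cs _
  unfold Spec_fuzzy_match_with_highlights fuzzy_match_with_highlights fuzzy_match_with_highlights_alt
  cases hS : ss.toList with
  | nil => rfl
  | cons s0 stail =>
    cases hT : sts.toList with
    | nil => rfl
    | cons c0 rest0 =>
      simp only
      have h0 : 0 < (s0 :: stail).length := by simp
      have hscan : pvScan (s0 :: stail) cs (c0 :: rest0) 0 =
          (if pvMatch s0 c0 cs then
            (((1 : Int), c0) :: (pvScan (s0 :: stail) cs rest0 1).1, (pvScan (s0 :: stail) cs rest0 1).2)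
          else
            (((0 : Int), c0) :: (pvScan (s0 :: stail) cs rest0 0).1, (pvScan (s0 :: stail) cs rest0 0).2)) := by
        simp [pvScan]
      by_cases hm : pvMatch s0 c0 cs
      · rw [hscan, if_pos hm, if_pos hm]
        have hmain := pvAwhile_eq (s0 :: stail) cs rest0 1 [] 1 [c0] (by simp) (by simp)
        simp only at hmain
        rw [hmain.2]
        by_cases hfail : (pvScan (s0 :: stail) cs rest0 1).2 ≠ (s0 :: stail).length
        · rw [if_pos hfail, if_pos hfail]
        · rw [if_neg hfail, if_neg hfail]
          rw [hmain.1]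
          have : List.foldl pvRunsStep [] (((1 : Int), c0) :: (pvScan (s0 :: stail) cs rest0 1).1)
              = pvGroupFrom 1 [c0] (pvScan (s0 :: stail) cs rest0 1).1 := by
            rw [show List.foldl pvRunsStep [] (((1 : Int), c0) :: (pvScan (s0 :: stail) cs rest0 1).1)
                = List.foldl pvRunsStep ([] ++ [((1 : Int), String.ofList [c0])]) (pvScan (s0 :: stail) cs rest0 1).1
                from by simp [pvRunsStep, pvSingletonOfList]]
            rw [pvRuns_eq_groupFrom]
            simp
          rw [this]
          simp
      · rw [hscan, if_neg hm, if_neg hm]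
        have hmain := pvAwhile_eq (s0 :: stail) cs rest0 0 [] 0 [c0] (by simp) (by simp)
        simp only at hmain
        rw [hmain.2]
        by_cases hfail : (pvScan (s0 :: stail) cs rest0 0).2 ≠ (s0 :: stail).length
        · rw [if_pos hfail, if_pos hfail]
        · rw [if_neg hfail, if_neg hfail]
          rw [hmain.1]
          have : List.foldl pvRunsStep [] (((0 : Int), c0) :: (pvScan (s0 :: stail) cs rest0 0).1)
              = pvGroupFrom 0 [c0] (pvScan (s0 :: stail) cs rest0 0).1 := by
            rw [show List.foldl pvRunsStep [] (((0 : Int), c0) :: (pvScan (s0 :: stail) cs rest0 0).1)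
                = List.foldl pvRunsStep ([] ++ [((0 : Int), String.ofList [c0])]) (pvScan (s0 :: stail) cs rest0 0).1
                from by simp [pvRunsStep, pvSingletonOfList]]
            rw [pvRuns_eq_groupFrom]
            simp
          rw [this]
          simp
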